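-- pv_equiv track=rewrite | github.com/vladrotariu1/laborator-python | lab2/9-spectators.py | get_unlucky_spectators
-- ===== SOURCE A (Python) =====
-- def get_unlucky_spectators(matrix):
--
--     position_tuples = []
--
--     matrix_transpose = list(zip(*matrix))
--
--     for c in range(len(matrix_transpose)):
--         for l in range(1, len(matrix_transpose[0])):
--             if matrix_transpose[c][l] <= max(matrix_transpose[c][:l]):
--                 position_tuples.append(tuple((l, c)))
--     return position_tuples
-- ===== SOURCE B (Python) =====
-- from itertools import accumulate
--
--
-- def get_unlucky_spectators(matrix):
--     result = []
--     for c, col in enumerate(zip(*matrix)):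
--         # first pass: materialize the full prefix-maximum table of the column
--         prefix_max = list(accumulate(col, max))
--         # second pass: compare each spectator with the tallest in front of them
--         for l in range(1, len(col)):
--             if col[l] <= prefix_max[l - 1]:
--                 result.append((l, c))
--     return result
-- ===== Notes on version B (the rewrite author's own statement) =====
-- stated objective: faster
-- what changed: Replaced A's inner max(col[:l]) rescan (recomputed for every row) by a per-column two-pass decomposition: first materialize the full prefix-maximum table with itertools.accumulate(col, max), then compare each entry against the table.
import Mathlib
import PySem

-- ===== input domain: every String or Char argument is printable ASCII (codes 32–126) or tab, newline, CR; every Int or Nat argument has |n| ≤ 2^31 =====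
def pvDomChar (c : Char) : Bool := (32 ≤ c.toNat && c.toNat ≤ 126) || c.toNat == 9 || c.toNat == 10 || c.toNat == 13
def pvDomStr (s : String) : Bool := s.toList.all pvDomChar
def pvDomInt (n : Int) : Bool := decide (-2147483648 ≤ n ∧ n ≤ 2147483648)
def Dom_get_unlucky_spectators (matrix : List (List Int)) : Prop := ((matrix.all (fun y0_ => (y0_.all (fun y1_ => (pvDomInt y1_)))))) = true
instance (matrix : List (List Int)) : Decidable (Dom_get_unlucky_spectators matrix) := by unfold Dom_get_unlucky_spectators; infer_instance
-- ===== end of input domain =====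

-- B replaces A's repeated max(col[:l]) rescans by a materialized prefix-maximum table per column
-- (build table first, compare second): same output, O(C·R) instead of O(C·R²).

-- ===== PORT A =====
-- zip(*matrix): truncates to the shortest row; column i is the i-th entry of every row.
-- (shared helper: both Pythons start with zip(*matrix))
def pyZip (rows : List (List Int)) : List (List Int) :=
  match rows with
  | [] => []
  | r0 :: rest =>
    (List.range (rest.foldl (fun m r => min m r.length) r0.length)).map
      (fun i => (r0 :: rest).map (fun r => r.getD i 0))

def get_unlucky_spectators (matrix : List (List Int)) : List (Int × Int) :=
  let t := pyZip matrix
  (PySem.List.pyRange 0 (PySem.List.len t)).foldl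
    (fun acc c =>
      (PySem.List.pyRange 1 (PySem.List.len (PySem.List.pyGetD t 0 []))).foldl
        (fun acc2 l =>
          -- max(t[c][:l]): the slice is nonempty (1 ≤ l), so max? is never none; .getD 0 unreachable
          if PySem.List.pyGetD (PySem.List.pyGetD t c []) l 0 ≤
             (PySem.List.max? (PySem.List.slice (PySem.List.pyGetD t c []) none (some l)) (fun y => y)).getD 0
          then acc2 ++ [(l, c)] else acc2) acc) []

-- ===== PORT B =====
-- list(itertools.accumulate(col, max)): the running-maximum table of the column
def prefixMaxGo (m : Int) : List Int → List Int
  | [] => []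
  | x :: xs => (max m x) :: prefixMaxGo (max m x) xs

def prefixMax : List Int → List Int
  | [] => []
  | h :: t => h :: prefixMaxGo h t

def get_unlucky_spectators_alt (matrix : List (List Int)) : List (Int × Int) :=
  (PySem.List.enumerate (pyZip matrix)).foldl
    (fun acc p =>
      let pm := prefixMax p.2
      (PySem.List.pyRange 1 (PySem.List.len p.2)).foldl
        (fun acc2 l =>
          if PySem.List.pyGetD p.2 l 0 ≤ PySem.List.pyGetD pm (l - 1) 0
          then acc2 ++ [(l, p.1)] else acc2) acc) []

-- ===== PRECONDITION & SPEC =====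
def Spec_get_unlucky_spectators (matrix : List (List Int)) (out : List (Int × Int)) : Prop := out = get_unlucky_spectators_alt matrix
instance (matrix : List (List Int)) (out : List (Int × Int)) : Decidable (Spec_get_unlucky_spectators matrix out) := by unfold Spec_get_unlucky_spectators; infer_instance

-- ===== CLAIM (what is proved, stated in full; the proofs are below) =====
def Claim_equal_get_unlucky_spectators : Prop := ∀ (matrix : List (List Int)), Dom_get_unlucky_spectators matrix → Spec_get_unlucky_spectators matrix (get_unlucky_spectators matrix)

-- ===== LEMMAS AND PROOFS =====

-- every column produced by pyZip has length = number of rows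
lemma mem_pyZip_length {rows : List (List Int)} {col : List Int}
    (h : col ∈ pyZip rows) : col.length = rows.length := by
  cases rows with
  | nil => simp [pyZip] at h
  | cons r0 rest =>
    simp only [pyZip, List.mem_map, List.mem_range] at h
    obtain ⟨i, _, rfl⟩ := h
    simp

lemma prefixMaxGo_getD (t : List Int) : ∀ (m : Int) (k : Nat), k < t.length →
    (prefixMaxGo m t).getD k 0 = (t.take (k+1)).foldl max m := by
  induction t with
  | nil => intro m k hk; simp at hk
  | cons x xs ih =>
    intro m k hk
    cases k with
    | zero => simp [prefixMaxGo]
    | succ k =>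
      simp only [prefixMaxGo, List.getD_cons_succ, List.take_succ_cons, List.foldl_cons]
      exact ih (max m x) k (by simpa using hk)

-- max(col[:k+1]) equals entry k of the prefix-maximum table
lemma prefixMax_max? (col : List Int) (k : Nat) (hk : k < col.length) :
    PySem.List.max? (col.take (k+1)) (fun y => y) = some ((prefixMax col).getD k 0) := by
  cases col with
  | nil => simp at hk
  | cons h t =>
    rw [List.take_succ_cons, PySem.List.max?_id_cons]
    cases k with
    | zero => simp [prefixMax]
    | succ k =>
      simp only [prefixMax, List.getD_cons_succ]
      rw [prefixMaxGo_getD t h k (by simpa using hk)]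

-- ===== VERDICT (by name: the statement is the Claim_ definition above) =====
theorem get_unlucky_spectators_spec : Claim_equal_get_unlucky_spectators := by
  intro matrix _
  unfold Spec_get_unlucky_spectators
  unfold get_unlucky_spectators get_unlucky_spectators_alt
  rw [PySem.List.enumerate_eq_map_pyRange (pyZip matrix) ([] : List Int), List.foldl_map]
  apply PySem.List.foldl_congr_mem
  intro acc c hc
  rw [PySem.List.mem_pyRange_one] at hc
  have hlen : PySem.List.len (pyZip matrix) = ((pyZip matrix).length : Int) := by
    simp [PySem.List.len_eq]
  rw [hlen] at hc
  have htlen : 0 < (pyZip matrix).length := by omega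
  -- the two columns accessed: t[c] (a member) and t[0] (a member); both have length = matrix.length
  have hcol : PySem.List.pyGetD (pyZip matrix) c [] ∈ pyZip matrix := by
    apply PySem.List.pyGetD_mem
    simp [PySem.Raise.InRange]
    omega
  have hcol0 : PySem.List.pyGetD (pyZip matrix) 0 [] ∈ pyZip matrix := by
    apply PySem.List.pyGetD_mem
    simp [PySem.Raise.InRange]
    omega
  have hsame : PySem.List.len (PySem.List.pyGetD (pyZip matrix) 0 [])
      = PySem.List.len (PySem.List.pyGetD (pyZip matrix) c []) := by
    simp [PySem.List.len_eq, mem_pyZip_length hcol, mem_pyZip_length hcol0]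
  rw [hsame]
  apply PySem.List.foldl_congr_mem
  intro acc2 l hl
  rw [PySem.List.mem_pyRange_one] at hl
  set col := PySem.List.pyGetD (pyZip matrix) c [] with hcoldef
  have hllen : PySem.List.len col = (col.length : Int) := by simp [PySem.List.len_eq]
  rw [hllen] at hl
  have h1 : (1:Int) ≤ l := hl.1
  have h2 : l < (col.length : Int) := hl.2
  have hk : l.toNat - 1 < col.length := by omega
  have hslice : PySem.List.slice col none (some l) = col.take l.toNat :=
    PySem.List.slice_to col (by omega)
  have htn : l.toNat = (l.toNat - 1) + 1 := by omega
  rw [hslice, htn, prefixMax_max? col (l.toNat - 1) hk]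
  have hB : PySem.List.pyGetD (prefixMax col) (l - 1) 0 = (prefixMax col).getD (l.toNat - 1) 0 := by
    rw [PySem.List.pyGetD_of_nonneg _ _ (by omega : (0:Int) ≤ l - 1)]
    congr 1
    omega
  rw [hB]
  simp
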